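-- pv_equiv track=rewrite | github.com/wwood/singlem | singlem/taxonomy.py | split_taxonomy
-- ===== SOURCE A (Python) =====
-- def split_taxonomy(taxonomy_string):
--     if taxonomy_string:
--         tax = [t.strip() for t in taxonomy_string.split(';')]
--         while len(tax) > 0 and tax[-1] == '':
--             tax = tax[:-1]
--         return tax
--     else:
--         return None
-- ===== SOURCE B (Python) =====
-- def split_taxonomy(taxonomy_string):
--     if not taxonomy_string:
--         return None
--     trimmed = taxonomy_string.rstrip(" \t\n\r\x0b\x0c;")
--     if not trimmed:
--         return []
--     return [t.strip() for t in trimmed.split(';')]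
-- ===== Notes on version B (the rewrite author's own statement) =====
-- stated objective: simpler
-- what changed: Instead of building the full token list and trimming trailing empty tokens off it with a while loop of slices, B trims the raw string once with rstrip of whitespace-and-semicolons before splitting, so trailing empty tokens never exist.
import Mathlib
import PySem

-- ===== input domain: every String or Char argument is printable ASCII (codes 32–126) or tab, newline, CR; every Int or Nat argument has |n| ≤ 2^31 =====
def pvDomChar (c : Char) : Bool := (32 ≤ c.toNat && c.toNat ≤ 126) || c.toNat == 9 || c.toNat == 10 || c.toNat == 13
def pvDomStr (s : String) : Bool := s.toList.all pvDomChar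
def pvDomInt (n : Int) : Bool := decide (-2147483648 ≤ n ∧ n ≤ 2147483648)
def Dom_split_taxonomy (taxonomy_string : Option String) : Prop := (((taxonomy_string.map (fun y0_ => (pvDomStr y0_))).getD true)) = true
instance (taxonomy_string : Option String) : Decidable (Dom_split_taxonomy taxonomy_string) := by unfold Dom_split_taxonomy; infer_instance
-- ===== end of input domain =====

-- B replaces A's build-the-token-list-then-trim-it-with-a-while-loop by trimming the raw
-- string once (rstrip of whitespace-and-semicolons) BEFORE splitting, so trailing empty
-- tokens never exist (objective: simpler).

-- ===== PORT A =====
-- the 'while len(tax) > 0 and tax[-1] == "":' loop; tax[:-1] is the slice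
def trimTaxA (tax : List String) : List String :=
  if h : tax.length > 0 ∧ PySem.List.pyGet? tax (-1) = some "" then
    trimTaxA (PySem.List.slice tax none (some (-1)))
  else tax
termination_by tax.length
decreasing_by
  rw [(by norm_num : (-1:Int) = -((1:Nat):Int)), PySem.List.slice_to_neg_natCast tax 1 (by omega)]
  simp [List.length_take]; omega

def split_taxonomy (taxonomy_string : Option String) : Option (List String) :=
  match taxonomy_string with
  | some s =>
    if s ≠ "" then
      -- taxonomy_string.split(';') with a non-empty literal separator never raises
      some (trimTaxA (((PySem.Str.split? s ";").getD []).map PySem.Str.strip))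
    else none
  | none => none

-- ===== PORT B =====
-- membership in the literal character set " \t\n\r\x0b\x0c;" passed to rstrip
def isTrimCh (c : Char) : Bool :=
  c == ' ' || c == '\t' || c == '\n' || c == '\r' || c == '\x0b' || c == '\x0c' || c == ';'

-- hand port of s.rstrip(" \t\n\r\x0b\x0c;"): drop trailing characters of that set (exact)
def rstripSemiWs (s : String) : String :=
  String.ofList ((s.toList.reverse.dropWhile isTrimCh).reverse)

def split_taxonomy_alt (taxonomy_string : Option String) : Option (List String) :=
  match taxonomy_string with
  | none => none
  | some s =>
    if s = "" then none
    else
      let trimmed := rstripSemiWs s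
      if trimmed = "" then some []
      else some (((PySem.Str.split? trimmed ";").getD []).map PySem.Str.strip)

-- ===== PRECONDITION & SPEC =====
def Spec_split_taxonomy (taxonomy_string : Option String) (out : Option (List String)) : Prop := out = split_taxonomy_alt taxonomy_string
instance (taxonomy_string : Option String) (out : Option (List String)) : Decidable (Spec_split_taxonomy taxonomy_string out) := by unfold Spec_split_taxonomy; infer_instance

-- ===== CLAIM (what is proved, stated in full; the proofs are below) =====
def Claim_equal_split_taxonomy : Prop := ∀ (taxonomy_string : Option String), Dom_split_taxonomy taxonomy_string → Spec_split_taxonomy taxonomy_string (split_taxonomy taxonomy_string)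

-- ===== LEMMAS AND PROOFS =====

-- A's while loop is 'reverse, drop leading empties, reverse'
theorem trimTaxA_reverse (r : List String) :
    trimTaxA r.reverse = (r.dropWhile (· == "")).reverse := by
  induction r with
  | nil => unfold trimTaxA; simp
  | cons x xs ih =>
    unfold trimTaxA
    by_cases hx : x = ""
    · subst hx
      rw [dif_pos ?_]
      · rw [(by norm_num : (-1:Int) = -((1:Nat):Int)), PySem.List.slice_to_neg_natCast _ 1 (by omega)]
        simpa [List.reverse_cons, List.dropLast_concat] using ih
      · constructor
        · simp
        · rw [PySem.List.pyGet?_neg_one]; simp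
    · rw [dif_neg ?_]
      · simp [hx]
      · rw [PySem.List.pyGet?_neg_one]
        simp [hx]

-- Char-code bridge for membership tests
theorem charBeqToNat (c d : Char) : (c == d) = (c.toNat == d.toNat) := by
  by_cases h : c = d
  · simp [h]
  · have hn : c.toNat ≠ d.toNat := fun hn => h (Char.ext (UInt32.toNat_inj.mp hn))
    simp [h, hn]

-- on the domain, a character outside the rstrip set is not Python whitespace
theorem dom_not_trim_not_space (c : Char) (h1 : pvDomChar c = true) (h2 : isTrimCh c = false) :
    PySem.Chars.isspace c = false := by
  unfold pvDomChar at h1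
  unfold isTrimCh at h2
  rw [charBeqToNat c ' ', charBeqToNat c '\t', charBeqToNat c '\n', charBeqToNat c '\r',
      charBeqToNat c '\x0b', charBeqToNat c '\x0c', charBeqToNat c ';',
      (by decide : (' ').toNat = 32), (by decide : ('\t').toNat = 9), (by decide : ('\n').toNat = 10),
      (by decide : ('\r').toNat = 13), (by decide : ('\x0b').toNat = 11), (by decide : ('\x0c').toNat = 12),
      (by decide : (';').toNat = 59)] at h2
  simp only [PySem.Chars.isspace]
  simp only [Bool.or_eq_true, Bool.and_eq_true, decide_eq_true_eq, beq_iff_eq,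
    Bool.or_eq_false_iff, Bool.and_eq_false_iff, decide_eq_false_iff_not, beq_eq_false_iff_ne, ne_eq] at *
  omega

theorem trim_not_semi_space (c : Char) (h1 : isTrimCh c = true) (h2 : c ≠ ';') :
    PySem.Chars.isspace c = true := by
  unfold isTrimCh at h1
  simp only [Bool.or_eq_true, beq_iff_eq] at h1
  rcases h1 with ((((((h|h)|h)|h)|h)|h)|h) <;> first | (subst h; decide) | exact absurd h h2

theorem isTrimCh_semi : isTrimCh ';' = true := by decide

-- PySem's fueled splitOn on a one-character separator is Mathlib's splitOnP
theorem modifyHead_id' {α : Type} (l : List α) : List.modifyHead (fun x => x) l = l := by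
  cases l <;> simp

theorem go_spec (c : Char) (fuel : Nat) (l cur : List Char) (acc : List (List Char))
    (h : l.length ≤ fuel) :
    PySem.Chars.splitOn.go [c] fuel l cur acc
      = acc.reverse ++ (l.splitOnP (· == c)).modifyHead (cur.reverse ++ ·) := by
  induction fuel generalizing l cur acc with
  | zero =>
    interval_cases hl : l.length
    rw [List.length_eq_zero_iff] at hl
    subst hl
    simp [PySem.Chars.splitOn.go, List.splitOnP_nil]
  | succ f ih =>
    cases l with
    | nil => simp [PySem.Chars.splitOn.go, List.splitOnP_nil]
    | cons c' rest =>
      rw [PySem.Chars.splitOn.go]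
      by_cases hc : c = c'
      · subst hc
        have hp : List.isPrefixOf [c] (c :: rest) = true := by simp [List.isPrefixOf]
        simp only [hp, if_true, List.length_cons, List.drop_succ_cons]
        rw [ih _ _ _ (by simpa using h)]
        rw [List.splitOnP_cons]
        simp [modifyHead_id']
      · have hp : List.isPrefixOf [c] (c' :: rest) = false := by
          simp [List.isPrefixOf, hc]
        simp only [hp, Bool.false_eq_true, if_false]
        rw [ih _ _ _ (by simpa using h)]
        rw [List.splitOnP_cons]
        have hcc : (c' == c) = false := by simp [Ne.symm hc]
        simp only [hcc, Bool.false_eq_true, if_false, List.modifyHead_modifyHead]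
        congr 2
        funext x
        simp

theorem splitOn_eq (cs : List Char) (c : Char) :
    PySem.Chars.splitOn cs [c] = cs.splitOnP (· == c) := by
  rw [PySem.Chars.splitOn, go_spec c _ cs [] [] (by omega)]
  simp [modifyHead_id']

-- apply a function to the last element of a list
def appLast {α : Type} (f : α → α) : List α → List α
  | [] => []
  | [a] => [f a]
  | a :: b :: l => a :: appLast f (b :: l)

theorem appLast_cons_of_ne_nil {α : Type} (f : α → α) (a : α) (l : List α) (h : l ≠ []) :
    appLast f (a :: l) = a :: appLast f l := by
  cases l with
  | nil => exact absurd rfl h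
  | cons b t => rfl

theorem appLast_concat {α : Type} (f : α → α) (l : List α) (a : α) :
    appLast f (l ++ [a]) = l ++ [f a] := by
  induction l with
  | nil => rfl
  | cons x t ih =>
    rw [List.cons_append, appLast_cons_of_ne_nil f x (t ++ [a]) (by simp), ih]
    rfl

theorem map_appLast_eq {α β : Type} (f : α → β) (g : α → α) (l : List α)
    (h : ∀ x, f (g x) = f x) : (appLast g l).map f = l.map f := by
  induction l with
  | nil => rfl
  | cons a t ih =>
    cases t with
    | nil => simp [appLast, h]
    | cons b t' =>
      rw [appLast_cons_of_ne_nil g a (b :: t') (by simp)]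
      simp only [List.map_cons] at *
      rw [ih]

-- splitOnP over appending one character
theorem splitOnP_concat (p : Char → Bool) (xs : List Char) (c : Char) :
    (xs ++ [c]).splitOnP p
      = if p c then xs.splitOnP p ++ [[]] else appLast (· ++ [c]) (xs.splitOnP p) := by
  induction xs with
  | nil =>
    by_cases hc : p c <;> simp [List.splitOnP_cons, List.splitOnP_nil, hc, appLast]
  | cons x t ih =>
    rw [List.cons_append, List.splitOnP_cons, ih, List.splitOnP_cons]
    by_cases hx : p x
    · simp only [hx, if_true]
      by_cases hc : p c
      · simp [hc]
      · simp only [hc, Bool.false_eq_true, if_false]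
        rw [appLast_cons_of_ne_nil _ _ _ (List.splitOnP_ne_nil p t)]
    · simp only [hx, Bool.false_eq_true, if_false]
      obtain ⟨a, u, ha⟩ : ∃ a u, t.splitOnP p = a :: u := by
        cases h : t.splitOnP p with
        | nil => exact absurd h (List.splitOnP_ne_nil p t)
        | cons a u => exact ⟨a, u, rfl⟩
      by_cases hc : p c
      · simp [hc, ha]
      · simp only [hc, Bool.false_eq_true, if_false, ha]
        cases u with
        | nil => simp [appLast]
        | cons b u' =>
          simp only [List.modifyHead_cons]
          rw [appLast_cons_of_ne_nil _ a (b :: u') (by simp),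
              appLast_cons_of_ne_nil _ (x :: a) (b :: u') (by simp)]
          simp

-- strip facts
theorem strip_append_space (c : Char) (h : PySem.Chars.isspace c = true) (t : List Char) :
    PySem.Chars.strip (t ++ [c]) = PySem.Chars.strip t := by
  simp only [PySem.Chars.strip, PySem.Chars.lstrip, PySem.Chars.rstrip]
  rw [List.dropWhile_append]
  by_cases he : (List.dropWhile PySem.Chars.isspace t).isEmpty
  · simp [List.dropWhile, h, List.isEmpty_iff.mp he]
  · simp only [he, Bool.false_eq_true, if_false, List.reverse_append, List.reverse_cons,
      List.reverse_nil, List.nil_append, List.singleton_append, List.dropWhile_cons, h, if_true]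

theorem rstrip_append_nonspace (c : Char) (h : PySem.Chars.isspace c = false) (u : List Char) :
    PySem.Chars.rstrip (u ++ [c]) = u ++ [c] := by
  simp [PySem.Chars.rstrip, h]

theorem strip_append_nonspace_ne_nil (c : Char) (h : PySem.Chars.isspace c = false) (t : List Char) :
    PySem.Chars.strip (t ++ [c]) ≠ [] := by
  simp only [PySem.Chars.strip, PySem.Chars.lstrip]
  rw [List.dropWhile_append]
  by_cases he : (List.dropWhile PySem.Chars.isspace t).isEmpty
  · have h1 : List.dropWhile PySem.Chars.isspace [c] = [c] := by
      simp [h]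
    rw [if_pos he, h1]
    simp [PySem.Chars.rstrip, h]
  · rw [if_neg he, rstrip_append_nonspace c h]
    simp

theorem strip_nil : PySem.Chars.strip ([] : List Char) = [] := by decide

-- the heart: dropping trailing empty stripped tokens = splitting the rstripped string
theorem mainChars (cs : List Char) (hdom : cs.all pvDomChar = true) :
    ((cs.splitOnP (· == ';')).map PySem.Chars.strip).reverse.dropWhile (· == [])
      = if cs.reverse.dropWhile isTrimCh = [] then []
        else (((cs.reverse.dropWhile isTrimCh).reverse.splitOnP (· == ';')).map
                PySem.Chars.strip).reverse := by
  induction cs using List.reverseRecOn with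
  | nil => simp [List.splitOnP_nil, strip_nil]
  | append_singleton xs c ih =>
    have hdx : xs.all pvDomChar = true := by
      rw [List.all_append] at hdom; exact (Bool.and_eq_true_iff.mp hdom).1
    have hdc : pvDomChar c = true := by
      rw [List.all_append] at hdom
      simpa using (Bool.and_eq_true_iff.mp hdom).2
    have hrev : (xs ++ [c]).reverse = c :: xs.reverse := by simp
    by_cases htr : isTrimCh c = true
    · -- c is trimmed on the B side; on the A side the last token's strip stays/disappears
      have hdrop : (xs ++ [c]).reverse.dropWhile isTrimCh = xs.reverse.dropWhile isTrimCh := by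
        rw [hrev, List.dropWhile_cons, htr, if_pos rfl]
      rw [hdrop]
      by_cases hsemi : c = ';'
      · subst hsemi
        rw [splitOnP_concat, if_pos (by simp)]
        rw [List.map_append, List.reverse_append]
        simp only [List.map_cons, List.map_nil, strip_nil, List.reverse_cons, List.reverse_nil,
          List.nil_append, List.singleton_append, List.dropWhile_cons]
        rw [if_pos (by simp)]
        exact ih hdx
      · have hsp : PySem.Chars.isspace c = true := trim_not_semi_space c htr hsemi
        rw [splitOnP_concat, if_neg (by simp [hsemi])]
        rw [map_appLast_eq _ _ _ (fun t => strip_append_space c hsp t)]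
        exact ih hdx
    · -- c survives rstrip; the last token's strip is non-empty, nothing is dropped on either side
      have htr' : isTrimCh c = false := by simpa using htr
      have hsemi : c ≠ ';' := fun h => by rw [h, isTrimCh_semi] at htr'; cases htr'
      have hsp : PySem.Chars.isspace c = false := dom_not_trim_not_space c hdc htr'
      have hdrop : (xs ++ [c]).reverse.dropWhile isTrimCh = c :: xs.reverse := by
        rw [hrev, List.dropWhile_cons, htr', if_neg (by simp)]
      rw [hdrop, if_neg (by simp)]
      have hback : (c :: xs.reverse).reverse = xs ++ [c] := by simp
      rw [hback]
      -- show the dropWhile on the A side keeps everything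
      rw [splitOnP_concat, if_neg (by simp [hsemi])]
      obtain ⟨l', a, hL⟩ : ∃ l' a, xs.splitOnP (· == ';') = l' ++ [a] := by
        rcases List.eq_nil_or_concat (xs.splitOnP (· == ';')) with h | ⟨l', a, h⟩
        · exact absurd h (List.splitOnP_ne_nil _ xs)
        · exact ⟨l', a, by simpa [List.concat_eq_append] using h⟩
      rw [hL, appLast_concat]
      rw [List.map_append, List.reverse_append]
      simp only [List.map_cons, List.map_nil, List.reverse_cons, List.reverse_nil,
        List.nil_append, List.singleton_append, List.dropWhile_cons]
      rw [if_neg (by simp [strip_append_nonspace_ne_nil c hsp a])]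

-- String/Chars bridges
theorem strStrip_ofList (t : List Char) :
    PySem.Str.strip (String.ofList t) = String.ofList (PySem.Chars.strip t) := by
  simp [PySem.Str.strip]

theorem ofList_beq_empty (t : List Char) : ((String.ofList t) == "") = (t == []) := by
  by_cases h : t = []
  · subst h; decide
  · have hne : String.ofList t ≠ "" := fun he => h (by simpa using congrArg String.toList he)
    rw [beq_eq_false_iff_ne.mpr hne, beq_eq_false_iff_ne.mpr h]

theorem ofList_eq_empty_iff (t : List Char) : String.ofList t = "" ↔ t = [] := by
  constructor
  · intro he; exact by simpa using congrArg String.toList he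
  · intro h; subst h; rfl

-- both ports' "split then strip every token", expressed on the character level
theorem tokens_eq (s : String) :
    ((PySem.Str.split? s ";").getD []).map PySem.Str.strip
      = ((s.toList.splitOnP (· == ';')).map PySem.Chars.strip).map String.ofList := by
  rw [PySem.Str.split?]
  have h1 : PySem.Chars.split? s.toList ";".toList
      = some (PySem.Chars.splitOn s.toList [';']) := by
    rw [(by decide : ";".toList = [';']), PySem.Chars.split?]
    simp
  rw [h1]
  simp only [Option.map_some, Option.getD_some]
  rw [splitOn_eq, List.map_map, List.map_map]
  apply List.map_congr_left
  intro t _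
  simp [strStrip_ofList]

-- ===== VERDICT (by name: the statement is the Claim_ definition above) =====
theorem split_taxonomy_spec : Claim_equal_split_taxonomy := by
  intro t hdom
  unfold Spec_split_taxonomy split_taxonomy split_taxonomy_alt
  match t with
  | none => rfl
  | some s =>
    by_cases hs : s = ""
    · simp [hs]
    · simp only [hs, ne_eq, not_false_eq_true, if_true, if_false]
      have hdom' : s.toList.all pvDomChar = true := by
        unfold Dom_split_taxonomy at hdom
        simpa [pvDomStr] using hdom
      have hmain := mainChars s.toList hdom'
      have hA : trimTaxA (((PySem.Str.split? s ";").getD []).map PySem.Str.strip)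
          = ((((s.toList.splitOnP (· == ';')).map PySem.Chars.strip).reverse.dropWhile
              (· == [])).map String.ofList).reverse := by
        rw [tokens_eq]
        have hrw : ((s.toList.splitOnP (· == ';')).map PySem.Chars.strip).map String.ofList
            = ((((s.toList.splitOnP (· == ';')).map PySem.Chars.strip).reverse.map
                String.ofList)).reverse := by simp
        rw [hrw, trimTaxA_reverse]
        rw [List.dropWhile_map]
        simp only [Function.comp_def, ofList_beq_empty]
      rw [hA, hmain]
      by_cases hempty : s.toList.reverse.dropWhile isTrimCh = []
      · rw [if_pos hempty]
        have : rstripSemiWs s = "" := by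
          rw [rstripSemiWs, ofList_eq_empty_iff, hempty]; rfl
        simp [this]
      · rw [if_neg hempty]
        have hne : rstripSemiWs s ≠ "" := by
          rw [rstripSemiWs, ne_eq, ofList_eq_empty_iff]
          simpa using hempty
        rw [if_neg hne]
        congr 1
        rw [tokens_eq]
        have htl : (rstripSemiWs s).toList = (s.toList.reverse.dropWhile isTrimCh).reverse := by
          rw [rstripSemiWs, String.toList_ofList]
        rw [htl]
        simp
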